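-- pv_equiv track=rewrite | github.com/jas88/MCPsharp | fix-tests.py | add_missing_using
-- ===== SOURCE A (Python) =====
-- def add_missing_using(content, filepath):
--     """Add missing using directives"""
--     lines = content.split('\n')
--     using_lines = [line for line in lines if line.strip().startswith('using ')]
--
--     # Check what's needed
--     needs_roslyn = 'CallerResult' in content or 'CallType' in content or 'ConfidenceLevel' in content
--     needs_streaming = 'StreamProcessRequest' in content or 'StreamProcessorType' in content
--     needs_analyzers = 'AnalyzerLoadResult' in content or 'IAnalyzerRegistry' in content
--
--     has_roslyn = any('MCPsharp.Models.Roslyn' in line for line in using_lines)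
--     has_streaming = any('MCPsharp.Models.Streaming' in line for line in using_lines)
--     has_analyzers = any('MCPsharp.Models.Analyzers' in line for line in using_lines)
--
--     # Add missing using statements
--     if needs_roslyn and not has_roslyn:
--         for i, line in enumerate(lines):
--             if line.strip().startswith('using MCPsharp.Models;'):
--                 lines.insert(i + 1, 'using MCPsharp.Models.Roslyn;')
--                 break
--
--     if needs_streaming and not has_streaming:
--         for i, line in enumerate(lines):
--             if line.strip().startswith('using MCPsharp.Models;'):
--                 lines.insert(i + 1, 'using MCPsharp.Models.Streaming;')
--                 break
--
--     if needs_analyzers and not has_analyzers: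
--         for i, line in enumerate(lines):
--             if line.strip().startswith('using MCPsharp.Models;'):
--                 lines.insert(i + 1, 'using MCPsharp.Models.Analyzers;')
--                 break
--
--     return '\n'.join(lines)
-- ===== SOURCE B (Python) =====
-- def add_missing_using(content, filepath):
--     """Add missing using directives"""
--     lines = content.split('\n')
--     using_lines = [line for line in lines if line.strip().startswith('using ')]
--
--     ins = []
--     # Stacked so the final order after the Models line is Analyzers, Streaming, Roslyn.
--     if (('AnalyzerLoadResult' in content or 'IAnalyzerRegistry' in content)
--             and not any('MCPsharp.Models.Analyzers' in line for line in using_lines)):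
--         ins.append('using MCPsharp.Models.Analyzers;')
--     if (('StreamProcessRequest' in content or 'StreamProcessorType' in content)
--             and not any('MCPsharp.Models.Streaming' in line for line in using_lines)):
--         ins.append('using MCPsharp.Models.Streaming;')
--     if (('CallerResult' in content or 'CallType' in content or 'ConfidenceLevel' in content)
--             and not any('MCPsharp.Models.Roslyn' in line for line in using_lines)):
--         ins.append('using MCPsharp.Models.Roslyn;')
--
--     idx = next((i for i, line in enumerate(lines)
--                 if line.strip().startswith('using MCPsharp.Models;')), None)
--     if idx is not None:
--         lines[idx + 1:idx + 1] = ins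
--     return '\n'.join(lines)
-- ===== Notes on version B (the rewrite author's own statement) =====
-- stated objective: simpler
-- what changed: B collects the needed-and-missing directives into one ordered list, finds the first 'using MCPsharp.Models;' line with a single scan, and splices the list in with one slice assignment, replacing A's three separate scan-insert-break loops over the mutated list.
import Mathlib
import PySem

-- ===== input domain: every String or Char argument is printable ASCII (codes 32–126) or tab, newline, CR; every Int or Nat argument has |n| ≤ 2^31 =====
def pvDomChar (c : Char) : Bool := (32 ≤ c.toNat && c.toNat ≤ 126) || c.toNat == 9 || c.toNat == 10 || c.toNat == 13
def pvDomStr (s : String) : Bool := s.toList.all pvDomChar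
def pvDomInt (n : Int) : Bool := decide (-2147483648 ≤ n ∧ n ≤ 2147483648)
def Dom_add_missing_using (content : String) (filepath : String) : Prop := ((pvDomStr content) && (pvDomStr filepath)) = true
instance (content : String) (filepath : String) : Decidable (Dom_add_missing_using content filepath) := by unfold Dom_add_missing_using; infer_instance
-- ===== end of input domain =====

-- B replaces A's three separate scan-and-insert loops by one computed directive list,
-- one scan for the first 'using MCPsharp.Models;' line, and a single splice (objective: simpler).

-- ===== PORT A =====
-- A's 'for i, line in enumerate(lines): if cond: lines.insert(i+1, v); break'
-- as the obvious structural recursion: walk until the first line satisfying p, put v after it.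
def insertAfterFirst (p : String → Bool) (v : String) : List String → List String
  | [] => []
  | x :: xs => if p x then x :: v :: xs else x :: insertAfterFirst p v xs

def add_missing_using (content : String) (filepath : String) : String :=
  let lines := (PySem.Str.split? content "\n").getD []
  let using_lines := lines.filter (fun line => PySem.Str.startswith (PySem.Str.strip line) "using ")
  let needs_roslyn := PySem.Str.isIn "CallerResult" content || PySem.Str.isIn "CallType" content ||
    PySem.Str.isIn "ConfidenceLevel" content
  let needs_streaming := PySem.Str.isIn "StreamProcessRequest" content ||
    PySem.Str.isIn "StreamProcessorType" content
  let needs_analyzers := PySem.Str.isIn "AnalyzerLoadResult" content ||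
    PySem.Str.isIn "IAnalyzerRegistry" content
  let has_roslyn := using_lines.any (fun line => PySem.Str.isIn "MCPsharp.Models.Roslyn" line)
  let has_streaming := using_lines.any (fun line => PySem.Str.isIn "MCPsharp.Models.Streaming" line)
  let has_analyzers := using_lines.any (fun line => PySem.Str.isIn "MCPsharp.Models.Analyzers" line)
  let lines1 := if needs_roslyn && !has_roslyn then
      insertAfterFirst (fun line => PySem.Str.startswith (PySem.Str.strip line) "using MCPsharp.Models;")
        "using MCPsharp.Models.Roslyn;" lines
    else lines
  let lines2 := if needs_streaming && !has_streaming then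
      insertAfterFirst (fun line => PySem.Str.startswith (PySem.Str.strip line) "using MCPsharp.Models;")
        "using MCPsharp.Models.Streaming;" lines1
    else lines1
  let lines3 := if needs_analyzers && !has_analyzers then
      insertAfterFirst (fun line => PySem.Str.startswith (PySem.Str.strip line) "using MCPsharp.Models;")
        "using MCPsharp.Models.Analyzers;" lines2
    else lines2
  PySem.Str.join "\n" lines3

-- ===== PORT B =====
def add_missing_using_alt (content : String) (filepath : String) : String :=
  let lines := (PySem.Str.split? content "\n").getD []
  let using_lines := lines.filter (fun line => PySem.Str.startswith (PySem.Str.strip line) "using ")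
  let ins : List String :=
    (if (PySem.Str.isIn "AnalyzerLoadResult" content || PySem.Str.isIn "IAnalyzerRegistry" content) &&
        !(using_lines.any (fun line => PySem.Str.isIn "MCPsharp.Models.Analyzers" line)) then
       ["using MCPsharp.Models.Analyzers;"] else []) ++
    (if (PySem.Str.isIn "StreamProcessRequest" content || PySem.Str.isIn "StreamProcessorType" content) &&
        !(using_lines.any (fun line => PySem.Str.isIn "MCPsharp.Models.Streaming" line)) then
       ["using MCPsharp.Models.Streaming;"] else []) ++
    (if (PySem.Str.isIn "CallerResult" content || PySem.Str.isIn "CallType" content ||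
         PySem.Str.isIn "ConfidenceLevel" content) &&
        !(using_lines.any (fun line => PySem.Str.isIn "MCPsharp.Models.Roslyn" line)) then
       ["using MCPsharp.Models.Roslyn;"] else [])
  match lines.findIdx? (fun line => PySem.Str.startswith (PySem.Str.strip line) "using MCPsharp.Models;") with
  | none => PySem.Str.join "\n" lines
  | some i => PySem.Str.join "\n" (lines.take (i + 1) ++ ins ++ lines.drop (i + 1))

-- ===== PRECONDITION & SPEC =====
def Spec_add_missing_using (content : String) (filepath : String) (out : String) : Prop := out = add_missing_using_alt content filepath
instance (content : String) (filepath : String) (out : String) : Decidable (Spec_add_missing_using content filepath out) := by unfold Spec_add_missing_using; infer_instance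

-- ===== CLAIM (what is proved, stated in full; the proofs are below) =====
def Claim_equal_add_missing_using : Prop := ∀ (content : String) (filepath : String), Dom_add_missing_using content filepath → Spec_add_missing_using content filepath (add_missing_using content filepath)

-- ===== LEMMAS AND PROOFS =====

theorem iaf_none {p : String → Bool} {xs : List String} (v : String)
    (h : xs.findIdx? p = none) : insertAfterFirst p v xs = xs := by
  induction xs with
  | nil => rfl
  | cons x xs ih =>
    rw [List.findIdx?_cons] at h
    by_cases hp : p x
    · simp [hp] at h
    · simp only [hp, Bool.false_eq_true, if_false, Option.map_eq_none_iff] at h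
      simp [insertAfterFirst, hp, ih h]

-- the first line satisfying p sits inside xs.take (i+1), so inserting after the first match
-- of ANY list with that prefix puts v right after it
theorem iaf_take {p : String → Bool} {xs : List String} {i : Nat} (v : String)
    (h : xs.findIdx? p = some i) (ys : List String) :
    insertAfterFirst p v (xs.take (i + 1) ++ ys) = xs.take (i + 1) ++ v :: ys := by
  induction xs generalizing i with
  | nil => simp at h
  | cons x xs ih =>
    rw [List.findIdx?_cons] at h
    by_cases hp : p x
    · simp only [hp, if_true, Option.some.injEq] at h
      subst h
      simp [insertAfterFirst, hp]
    · simp only [hp, Bool.false_eq_true, if_false, Option.map_eq_some_iff] at h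
      obtain ⟨j, hj, rfl⟩ := h
      simp [insertAfterFirst, hp, List.take_succ_cons, ih hj]

theorem iaf_some {p : String → Bool} {xs : List String} {i : Nat} (v : String)
    (h : xs.findIdx? p = some i) :
    insertAfterFirst p v xs = xs.take (i + 1) ++ v :: xs.drop (i + 1) := by
  conv_lhs => rw [← List.take_append_drop (i + 1) xs]
  exact iaf_take v h _

theorem chain_eq (p : String → Bool) (fr fs fa : Bool) (vr vs va : String) (lines : List String) :
    (let l1 := if fr then insertAfterFirst p vr lines else lines
     let l2 := if fs then insertAfterFirst p vs l1 else l1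
     if fa then insertAfterFirst p va l2 else l2)
    = (match lines.findIdx? p with
       | none => lines
       | some i => lines.take (i + 1) ++
           ((if fa then [va] else []) ++ (if fs then [vs] else []) ++ (if fr then [vr] else [])) ++
           lines.drop (i + 1)) := by
  cases h : lines.findIdx? p with
  | none =>
    simp only []
    split_ifs <;> simp [iaf_none _ h]
  | some i =>
    simp only []
    split_ifs <;>
      simp [iaf_some _ h, iaf_take _ h, List.take_append_drop]

-- ===== VERDICT (by name: the statement is the Claim_ definition above) =====
theorem add_missing_using_spec : Claim_equal_add_missing_using := by
  intro content filepath _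
  unfold Spec_add_missing_using add_missing_using add_missing_using_alt
  simp only []
  rw [chain_eq]
  cases ((PySem.Str.split? content "\n").getD []).findIdx?
      (fun line => PySem.Str.startswith (PySem.Str.strip line) "using MCPsharp.Models;") <;> simp
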